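-- pv_equiv track=rewrite | github.com/Yuri-barbosa21/Gomoku-Pygame | matrizes.py | obter_linhas
-- ===== SOURCE A (Python) =====
-- def diagonal_principal(matriz: list[list]):
--     """
--     Params: matriz -> Uma matriz quadrada (lista de listas)
--     Returns: Uma matriz sendo cada linha uma diagonal
--
--     1 0 0
--     0 1 0   -> Retorna: [[1], [0,0], [0,1,0], [0,0], [1]]
--     0 0 1
--     """
--     linhas = len(matriz)
--     colunas = len(matriz[0])
--
--     parcial = []
--     controle = 0
--     res = []
--
--     linha_atual = 0
--     coluna_atual = 0
--     subindo = True
--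
--     while(controle != linhas * colunas):
--         if subindo:
--             while linha_atual >= 0 and coluna_atual < colunas:
--                 parcial.append(matriz[linha_atual][coluna_atual])
--                 controle += 1
--
--                 linha_atual -= 1
--                 coluna_atual += 1
--
--             if coluna_atual == colunas:
--                 coluna_atual -= 1
--                 linha_atual += 2
--             else:
--                 linha_atual += 1
--
--             if parcial != []:
--                 res.append(parcial)
--                 parcial = []
--             subindo = False
--         else:
--             while linha_atual < linhas and coluna_atual >= 0:
--                 parcial.append(matriz[linha_atual][coluna_atual])
--                 controle +=1
--
--                 coluna_atual -= 1
--                 linha_atual += 1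
--
--             if linha_atual == linhas:
--                 coluna_atual += 2
--                 linha_atual -= 1
--
--             else:
--                 coluna_atual += 1
--
--             if parcial != []:
--                 res.append(parcial)
--                 parcial = []
--             subindo = True
--     return res
--
-- def rodar_matriz(matriz: list[list]):
--     """
--     #Params: matriz -> uma matriz quadrada (lista de listas)
--     #Returns: a transposta da matriz
--     """
--     matriz_nova = list(map(list, zip(*matriz[::-1])))
--     return matriz_nova
--
-- def diagonal_secundaria(matriz):
--     """
--     #Params: matriz -> uma matriz quadrada (lista de listas)
--     #Returns: Uma matriz sendo cada linha uma diagonal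
--     """
--     rodada = rodar_matriz(matriz)
--     return diagonal_principal(rodada)
--
-- def obter_linhas(matriz: list[list]):
--     """
--     #Params: matriz -> uma matriz quadrada (lista de listas)
--     #returns: Uma matriz que contém todas as linhas, colunas e ambas diagonais da matriz original
--     """
--     diagonais = []
--     principal = diagonal_principal(matriz)
--     secundaria = diagonal_secundaria(matriz)
--
--     diagonais = principal + secundaria
--
--     linhas_e_colunas = []
--     for line in matriz:
--         linhas_e_colunas.append(line)
--
--     colunas = rodar_matriz(matriz)
--     for linha in colunas:
--         linhas_e_colunas.append(linha)
--
--     tudo = diagonais + linhas_e_colunas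
--     return tudo
-- ===== SOURCE B (Python) =====
-- def obter_linhas(matriz: list[list]):
--     n, m = len(matriz), len(matriz[0])
--
--     def diag(mat, rows, cols, k):
--         rs = [r for r in range(rows) if 0 <= k - r < cols]
--         if k % 2 == 0:
--             rs.reverse()
--         return [mat[r][k - r] for r in rs]
--
--     def diags(mat, rows, cols):
--         return [diag(mat, rows, cols, k) for k in range(rows + cols - 1)]
--
--     rot = [[matriz[n - 1 - j][i] for j in range(n)] for i in range(m)]
--     return diags(matriz, n, m) + diags(rot, m, n) + list(matriz) + rot
-- ===== Notes on version B (the rewrite author's own statement) =====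
-- stated objective: simpler
-- what changed: Replaces the stateful pointer-walk zig-zag (nested while loops with boundary-jump adjustments and an element counter) by direct index grouping: diagonal k is the cells with r+c=k, listed by ascending r and reversed for even k; the rotation is a double comprehension instead of zip(*matriz[::-1]).
import Mathlib
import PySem

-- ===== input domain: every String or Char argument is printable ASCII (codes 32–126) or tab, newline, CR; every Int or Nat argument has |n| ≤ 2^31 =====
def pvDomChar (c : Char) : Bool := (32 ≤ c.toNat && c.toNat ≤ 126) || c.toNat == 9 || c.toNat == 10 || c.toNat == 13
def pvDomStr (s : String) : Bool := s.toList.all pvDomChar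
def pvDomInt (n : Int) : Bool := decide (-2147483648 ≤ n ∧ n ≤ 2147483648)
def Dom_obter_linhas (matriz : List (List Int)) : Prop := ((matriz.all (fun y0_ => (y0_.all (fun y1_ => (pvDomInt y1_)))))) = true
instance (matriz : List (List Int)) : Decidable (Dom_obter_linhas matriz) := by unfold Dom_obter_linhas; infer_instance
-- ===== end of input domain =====

-- B replaces A's stateful pointer-walk zig-zag by direct index grouping (diagonal k = cells with
-- r+c=k, reversed for even k) and the zip-based rotation by a double comprehension; objective:
-- simpler.  Equality is claimed on nonempty rectangular matrices with nonempty rows (Pre_).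

-- ===== PORT A =====
-- matriz[l][c]; exact wherever both indices are in range (Pre_ keeps every access in range)
def pvGetI (M : List (List Int)) (l c : Int) : Int :=
  (PySem.List.pyGet? ((PySem.List.pyGet? M l).getD []) c).getD 0

-- inner 'while subindo' loop of diagonal_principal; fuel only makes it total (the outer caller
-- hands linhas+colunas fuel, more than the loop's step count; running out returns the same state
-- tuple as the guard failing)
def pvUpLoop (M : List (List Int)) (colunas : Int) :
    Nat → Int → Int → List Int → Int → (List Int × Int × Int × Int)
  | 0, l, c, p, ct => (p, l, c, ct)
  | fuel+1, l, c, p, ct =>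
    if 0 ≤ l ∧ c < colunas then
      pvUpLoop M colunas fuel (l - 1) (c + 1) (p ++ [pvGetI M l c]) (ct + 1)
    else (p, l, c, ct)

-- inner 'while not subindo' loop
def pvDownLoop (M : List (List Int)) (linhas : Int) :
    Nat → Int → Int → List Int → Int → (List Int × Int × Int × Int)
  | 0, l, c, p, ct => (p, l, c, ct)
  | fuel+1, l, c, p, ct =>
    if l < linhas ∧ 0 ≤ c then
      pvDownLoop M linhas fuel (l + 1) (c - 1) (p ++ [pvGetI M l c]) (ct + 1)
    else (p, l, c, ct)

-- outer 'while controle != linhas*colunas' loop; fuel (linhas*colunas+1 at the call site) only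
-- makes it total — on Pre_ inputs the guard exits first
def pvZigLoop (M : List (List Int)) (linhas colunas : Int) :
    Nat → Bool → Int → Int → Int → List (List Int) → List (List Int)
  | 0, _, _, _, _, res => res
  | fuel+1, subindo, l, c, ct, res =>
    if ct = linhas * colunas then res
    else if subindo then
      let s := pvUpLoop M colunas ((linhas + colunas).toNat) l c [] ct
      let lc : Int × Int := if s.2.2.1 = colunas then (s.2.1 + 2, s.2.2.1 - 1) else (s.2.1 + 1, s.2.2.1)
      pvZigLoop M linhas colunas fuel false lc.1 lc.2 s.2.2.2 (if s.1 ≠ [] then res ++ [s.1] else res)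
    else
      let s := pvDownLoop M linhas ((linhas + colunas).toNat) l c [] ct
      let lc : Int × Int := if s.2.1 = linhas then (s.2.1 - 1, s.2.2.1 + 2) else (s.2.1, s.2.2.1 + 1)
      pvZigLoop M linhas colunas fuel true lc.1 lc.2 s.2.2.2 (if s.1 ≠ [] then res ++ [s.1] else res)

def pvDiagonalPrincipal (M : List (List Int)) : List (List Int) :=
  let linhas : Int := M.length
  let colunas : Int := ((PySem.List.pyGet? M 0).getD []).length   -- len(matriz[0]); raises on [] (outside Pre_)
  pvZigLoop M linhas colunas ((linhas * colunas).toNat + 1) true 0 0 0 []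

-- zip(*rows) ported by hand: truncates to the shortest row, exactly as Python's zip
def pvZipStarGo : Nat → List (List Int) → List (List Int)
  | 0, _ => []
  | fuel+1, rows =>
    if rows.isEmpty then []
    else if rows.any (fun r => r.isEmpty) then []
    else (rows.map (fun r => r.headD 0)) :: pvZipStarGo fuel (rows.map (fun r => r.tail))

def pvZipStar (rows : List (List Int)) : List (List Int) :=
  pvZipStarGo (rows.headD []).length rows

-- list(map(list, zip(*matriz[::-1])))
def pvRodarMatriz (M : List (List Int)) : List (List Int) :=
  pvZipStar ((PySem.List.slice? M none none (-1)).getD [])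

def pvDiagonalSecundaria (M : List (List Int)) : List (List Int) :=
  pvDiagonalPrincipal (pvRodarMatriz M)

def obter_linhas (matriz : List (List Int)) : List (List Int) :=
  let principal := pvDiagonalPrincipal matriz
  let secundaria := pvDiagonalSecundaria matriz
  let diagonais := principal ++ secundaria
  let lc1 := matriz.foldl (fun acc line => acc ++ [line]) []
  let colunas := pvRodarMatriz matriz
  let lc2 := colunas.foldl (fun acc linha => acc ++ [linha]) lc1
  diagonais ++ lc2

-- ===== PORT B =====
def pvDiag (mat : List (List Int)) (rows cols k : Int) : List Int :=
  let rs := (PySem.List.pyRange 0 rows 1).filter (fun r => decide (0 ≤ k - r ∧ k - r < cols))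
  let rs := if PySem.Int.mod k 2 = 0 then rs.reverse else rs
  rs.map (fun r => pvGetI mat r (k - r))

def pvDiags (mat : List (List Int)) (rows cols : Int) : List (List Int) :=
  (PySem.List.pyRange 0 (rows + cols - 1) 1).map (fun k => pvDiag mat rows cols k)

def pvRot (M : List (List Int)) (n m : Int) : List (List Int) :=
  (PySem.List.pyRange 0 m 1).map (fun i =>
    (PySem.List.pyRange 0 n 1).map (fun j => pvGetI M (n - 1 - j) i))

def obter_linhas_alt (matriz : List (List Int)) : List (List Int) :=
  let n : Int := matriz.length
  let m : Int := ((PySem.List.pyGet? matriz 0).getD []).length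
  let rot := pvRot matriz n m
  pvDiags matriz n m ++ pvDiags rot m n ++ matriz ++ rot

-- ===== PRECONDITION & SPEC =====
-- Pre_ excludes the empty matrix and matrices whose first row is empty (A raises IndexError via
-- matriz[0] / rodada[0]) and ragged matrices, where zip(*)'s silent truncation makes A's value an
-- accident of its implementation.
def Pre_obter_linhas (matriz : List (List Int)) : Prop :=
  matriz ≠ [] ∧ matriz.headD [] ≠ [] ∧ ∀ row ∈ matriz, row.length = (matriz.headD []).length
instance (matriz : List (List Int)) : Decidable (Pre_obter_linhas matriz) := by
  unfold Pre_obter_linhas; infer_instance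

def pvWitness_obter_linhas : List (List Int) := [[1, 2], [3, 4]]

def Spec_obter_linhas (matriz : List (List Int)) (out : List (List Int)) : Prop := out = obter_linhas_alt matriz
instance (matriz : List (List Int)) (out : List (List Int)) : Decidable (Spec_obter_linhas matriz out) := by unfold Spec_obter_linhas; infer_instance

-- ===== CLAIM (what is proved, stated in full; the proofs are below) =====
def Claim_equal_obter_linhas : Prop := ∀ (matriz : List (List Int)), Dom_obter_linhas matriz → Pre_obter_linhas matriz → Spec_obter_linhas matriz (obter_linhas matriz)

-- ===== LEMMAS AND PROOFS =====

-- proof-side helpers: the cells of diagonal k (r+c = k) listed by ascending row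
def pvCell (M : List (List Int)) (r c : Nat) : Int := (M.getD r []).getD c 0
def pvRmin (C k : Nat) : Nat := k + 1 - C
def pvRmax (R k : Nat) : Nat := min k (R - 1)
def pvSize (R C k : Nat) : Nat := pvRmax R k + 1 - pvRmin C k
def pvAsc (M : List (List Int)) (R C k : Nat) : List Int :=
  (List.range' (pvRmin C k) (pvSize R C k)).map (fun r => pvCell M r (k - r))
def pvPhase (M : List (List Int)) (R C k : Nat) : List Int :=
  if k % 2 = 0 then (pvAsc M R C k).reverse else pvAsc M R C k
def pvT (R C k : Nat) : Nat := ∑ j ∈ Finset.range k, pvSize R C j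

theorem pvGetI_cast (M : List (List Int)) (r c : Nat) : pvGetI M (r : Int) (c : Int) = pvCell M r c := by
  simp [pvGetI, pvCell, PySem.List.pyGet?_natCast, List.getD_eq_getElem?_getD]

theorem pvUpLoop_exit (M : List (List Int)) (colunas : Int) (l c : Int) (p : List Int) (ct : Int)
    (h : ¬ (0 ≤ l ∧ c < colunas)) (fuel : Nat) :
    pvUpLoop M colunas fuel l c p ct = (p, l, c, ct) := by
  cases fuel with
  | zero => rfl
  | succ f => simp [pvUpLoop, h]

theorem pvDownLoop_exit (M : List (List Int)) (linhas : Int) (l c : Int) (p : List Int) (ct : Int)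
    (h : ¬ (l < linhas ∧ 0 ≤ c)) (fuel : Nat) :
    pvDownLoop M linhas fuel l c p ct = (p, l, c, ct) := by
  cases fuel with
  | zero => rfl
  | succ f => simp [pvDownLoop, h]

theorem pvUpLoop_run (M : List (List Int)) (R C k : Nat) (hC : 1 ≤ C)
    (hk : k < R + C - 1) :
    ∀ (j : Nat), pvRmin C k + j ≤ pvRmax R k →
    ∀ (fuel : Nat), j + 1 ≤ fuel → ∀ (p : List Int) (ct : Int),
      pvUpLoop M (C : Int) fuel ((pvRmin C k + j : Nat) : Int) ((k : Int) - ((pvRmin C k + j : Nat) : Int)) p ct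
        = (p ++ ((List.range' (pvRmin C k) (j + 1)).reverse.map (fun r => pvCell M r (k - r))),
           ((pvRmin C k : Nat) : Int) - 1, (k : Int) - ((pvRmin C k : Nat) : Int) + 1, ct + ((j : Int) + 1)) := by
  have e1 : pvRmin C k = k + 1 - C := rfl
  have e2 : pvRmax R k = min k (R - 1) := rfl
  intro j
  induction j with
  | zero =>
    intro hj fuel hf p ct
    obtain ⟨f, rfl⟩ : ∃ f, fuel = f + 1 := ⟨fuel - 1, by omega⟩
    have hg : (0 : Int) ≤ ((pvRmin C k + 0 : Nat) : Int) ∧ ((k : Int) - ((pvRmin C k + 0 : Nat) : Int)) < (C : Int) := by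
      constructor <;> omega
    rw [pvUpLoop, if_pos hg]
    have hstop : ¬ ((0:Int) ≤ ((pvRmin C k + 0 : Nat) : Int) - 1 ∧ ((k : Int) - ((pvRmin C k + 0 : Nat) : Int)) + 1 < (C : Int)) := by
      omega
    rw [pvUpLoop_exit _ _ _ _ _ _ hstop]
    have hle : pvRmin C k ≤ k := by omega
    have hcast : (k : Int) - ((pvRmin C k + 0 : Nat) : Int) = ((k - pvRmin C k : Nat) : Int) := by omega
    rw [hcast, pvGetI_cast]
    simp only [Prod.mk.injEq]
    refine ⟨by simp, by omega, by omega, by simp⟩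
  | succ j ih =>
    intro hj fuel hf p ct
    obtain ⟨f, rfl⟩ : ∃ f, fuel = f + 1 := ⟨fuel - 1, by omega⟩
    have hg : (0 : Int) ≤ ((pvRmin C k + (j+1) : Nat) : Int) ∧ ((k : Int) - ((pvRmin C k + (j+1) : Nat) : Int)) < (C : Int) := by
      constructor <;> omega
    rw [pvUpLoop, if_pos hg]
    have h1 : ((pvRmin C k + (j+1) : Nat) : Int) - 1 = ((pvRmin C k + j : Nat) : Int) := by omega
    have h2 : ((k : Int) - ((pvRmin C k + (j+1) : Nat) : Int)) + 1 = (k : Int) - ((pvRmin C k + j : Nat) : Int) := by omega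
    rw [h1, h2, ih (by omega) f (by omega)]
    have hle : pvRmin C k + (j+1) ≤ k := by omega
    have hcast : (k : Int) - ((pvRmin C k + (j+1) : Nat) : Int) = ((k - (pvRmin C k + (j+1)) : Nat) : Int) := by omega
    rw [hcast, pvGetI_cast]
    have hrng : List.range' (pvRmin C k) (j + 1 + 1) = List.range' (pvRmin C k) (j + 1) ++ [pvRmin C k + (j+1)] := by
      have := List.range'_concat (step := 1) (s := pvRmin C k) (n := j + 1)
      simpa using this
    rw [hrng]
    simp only [List.reverse_append, List.reverse_cons, List.reverse_nil, List.nil_append,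
      List.map_cons, List.append_assoc, List.cons_append, List.nil_append]
    simp only [Prod.mk.injEq]
    refine ⟨trivial, trivial, trivial, by push_cast; ring⟩

theorem pvDownLoop_run (M : List (List Int)) (R C k : Nat) (hR : 1 ≤ R)
    (hk : k < R + C - 1) :
    ∀ (j : Nat), pvRmin C k + j ≤ pvRmax R k →
    ∀ (fuel : Nat), j + 1 ≤ fuel → ∀ (p : List Int) (ct : Int),
      pvDownLoop M (R : Int) fuel ((pvRmax R k - j : Nat) : Int) ((k : Int) - ((pvRmax R k - j : Nat) : Int)) p ct
        = (p ++ ((List.range' (pvRmax R k - j) (j + 1)).map (fun r => pvCell M r (k - r))),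
           ((pvRmax R k : Nat) : Int) + 1, (k : Int) - ((pvRmax R k : Nat) : Int) - 1, ct + ((j : Int) + 1)) := by
  have e1 : pvRmin C k = k + 1 - C := rfl
  have e2 : pvRmax R k = min k (R - 1) := rfl
  intro j
  induction j with
  | zero =>
    intro hj fuel hf p ct
    obtain ⟨f, rfl⟩ : ∃ f, fuel = f + 1 := ⟨fuel - 1, by omega⟩
    have hg : ((pvRmax R k - 0 : Nat) : Int) < (R : Int) ∧ (0:Int) ≤ (k : Int) - ((pvRmax R k - 0 : Nat) : Int) := by
      constructor <;> omega
    rw [pvDownLoop, if_pos hg]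
    have hstop : ¬ (((pvRmax R k - 0 : Nat) : Int) + 1 < (R : Int) ∧ (0:Int) ≤ ((k : Int) - ((pvRmax R k - 0 : Nat) : Int)) - 1) := by
      omega
    rw [pvDownLoop_exit _ _ _ _ _ _ hstop]
    have hcast : (k : Int) - ((pvRmax R k - 0 : Nat) : Int) = ((k - (pvRmax R k - 0) : Nat) : Int) := by
      omega
    rw [hcast, pvGetI_cast]
    simp only [Prod.mk.injEq]
    refine ⟨by simp, by omega, by omega, by simp⟩
  | succ j ih =>
    intro hj fuel hf p ct
    obtain ⟨f, rfl⟩ : ∃ f, fuel = f + 1 := ⟨fuel - 1, by omega⟩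
    have hg : ((pvRmax R k - (j+1) : Nat) : Int) < (R : Int) ∧ (0:Int) ≤ (k : Int) - ((pvRmax R k - (j+1) : Nat) : Int) := by
      constructor <;> omega
    rw [pvDownLoop, if_pos hg]
    have h1 : ((pvRmax R k - (j+1) : Nat) : Int) + 1 = ((pvRmax R k - j : Nat) : Int) := by
      omega
    have h2 : ((k : Int) - ((pvRmax R k - (j+1) : Nat) : Int)) - 1 = (k : Int) - ((pvRmax R k - j : Nat) : Int) := by
      omega
    rw [h1, h2, ih (by omega) f (by omega)]
    have hcast : (k : Int) - ((pvRmax R k - (j+1) : Nat) : Int) = ((k - (pvRmax R k - (j+1)) : Nat) : Int) := by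
      omega
    rw [hcast, pvGetI_cast]
    have hrng : List.range' (pvRmax R k - (j+1)) (j + 1 + 1) = (pvRmax R k - (j+1)) :: List.range' (pvRmax R k - j) (j + 1) := by
      have := List.range'_succ (step := 1) (s := pvRmax R k - (j+1)) (n := j + 1)
      have h3 : pvRmax R k - (j+1) + 1 = pvRmax R k - j := by omega
      rw [this, h3]
    rw [hrng]
    simp only [List.map_cons, List.append_assoc, List.cons_append, List.nil_append]
    simp only [Prod.mk.injEq]
    refine ⟨trivial, trivial, trivial, by push_cast; ring⟩

theorem pvUpPhase (M : List (List Int)) (R C k : Nat) (hR : 1 ≤ R) (hC : 1 ≤ C)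
    (hk : k < R + C - 1) (ct : Int) :
    pvUpLoop M (C : Int) (R + C) ((pvRmax R k : Nat) : Int) ((k : Int) - ((pvRmax R k : Nat) : Int)) [] ct
      = ((pvAsc M R C k).reverse, ((pvRmin C k : Nat) : Int) - 1,
         (k : Int) - ((pvRmin C k : Nat) : Int) + 1, ct + ((pvSize R C k : Nat) : Int)) := by
  have e1 : pvRmin C k = k + 1 - C := rfl
  have e2 : pvRmax R k = min k (R - 1) := rfl
  have e3 : pvSize R C k = pvRmax R k + 1 - pvRmin C k := rfl
  have h := pvUpLoop_run M R C k hC hk (pvSize R C k - 1) (by omega) (R + C) (by omega) [] ct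
  have hidx : pvRmin C k + (pvSize R C k - 1) = pvRmax R k := by omega
  have hsz : pvSize R C k - 1 + 1 = pvSize R C k := by omega
  rw [hidx, hsz] at h
  rw [h]
  simp only [Prod.mk.injEq]
  refine ⟨by simp [pvAsc, List.map_reverse], trivial, trivial, by omega⟩

theorem pvDownPhase (M : List (List Int)) (R C k : Nat) (hR : 1 ≤ R) (hC : 1 ≤ C)
    (hk : k < R + C - 1) (ct : Int) :
    pvDownLoop M (R : Int) (R + C) ((pvRmin C k : Nat) : Int) ((k : Int) - ((pvRmin C k : Nat) : Int)) [] ct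
      = (pvAsc M R C k, ((pvRmax R k : Nat) : Int) + 1,
         (k : Int) - ((pvRmax R k : Nat) : Int) - 1, ct + ((pvSize R C k : Nat) : Int)) := by
  have e1 : pvRmin C k = k + 1 - C := rfl
  have e2 : pvRmax R k = min k (R - 1) := rfl
  have e3 : pvSize R C k = pvRmax R k + 1 - pvRmin C k := rfl
  have h := pvDownLoop_run M R C k hR hk (pvSize R C k - 1) (by omega) (R + C) (by omega) [] ct
  have hidx : pvRmax R k - (pvSize R C k - 1) = pvRmin C k := by omega
  have hsz : pvSize R C k - 1 + 1 = pvSize R C k := by omega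
  rw [hidx, hsz] at h
  rw [h]
  simp only [Prod.mk.injEq]
  refine ⟨by simp [pvAsc], trivial, trivial, by omega⟩

theorem pvT_succ (R C k : Nat) : pvT R C (k + 1) = pvT R C k + pvSize R C k :=
  Finset.sum_range_succ _ _

theorem pvSize_pos (R C k : Nat) (hR : 1 ≤ R) (hC : 1 ≤ C) (hk : k < R + C - 1) :
    1 ≤ pvSize R C k := by
  have e1 : pvRmin C k = k + 1 - C := rfl
  have e2 : pvRmax R k = min k (R - 1) := rfl
  have e3 : pvSize R C k = pvRmax R k + 1 - pvRmin C k := rfl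
  omega

theorem pvT_total (R C : Nat) (hR : 1 ≤ R) (hC : 1 ≤ C) : pvT R C (R + C - 1) = R * C := by
  have hfib : ∀ j, pvSize R C j
      = (((Finset.range R) ×ˢ (Finset.range C)).filter (fun p => p.1 + p.2 = j)).card := by
    intro j
    have himg : (((Finset.range R) ×ˢ (Finset.range C)).filter (fun p => p.1 + p.2 = j))
        = (Finset.Icc (pvRmin C j) (pvRmax R j)).image (fun r => (r, j - r)) := by
      ext ⟨a, b⟩
      simp only [Finset.mem_filter, Finset.mem_product, Finset.mem_range, Finset.mem_image,
        Finset.mem_Icc, pvRmin, pvRmax, Prod.mk.injEq]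
      constructor
      · rintro ⟨⟨ha, hb⟩, hab⟩
        exact ⟨a, by omega, by omega, by omega⟩
      · rintro ⟨r, hr, h1, h2⟩
        refine ⟨⟨by omega, by omega⟩, by omega⟩
    rw [himg, Finset.card_image_of_injective, Nat.card_Icc]
    · rfl
    · intro a b hab
      simpa using congrArg Prod.fst hab
  have hmaps : ∀ p ∈ (Finset.range R) ×ˢ (Finset.range C),
      (fun q : Nat × Nat => q.1 + q.2) p ∈ Finset.range (R + C - 1) := by
    intro p hp
    simp only [Finset.mem_product, Finset.mem_range] at hp ⊢
    omega
  have hcard := Finset.card_eq_sum_card_fiberwise hmaps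
  calc pvT R C (R + C - 1)
      = ∑ j ∈ Finset.range (R + C - 1),
          (((Finset.range R) ×ˢ (Finset.range C)).filter (fun p => p.1 + p.2 = j)).card :=
        Finset.sum_congr rfl (fun j _ => hfib j)
    _ = ((Finset.range R) ×ˢ (Finset.range C)).card := hcard.symm
    _ = R * C := by simp [Finset.card_product]

theorem pvT_lt (R C k : Nat) (hR : 1 ≤ R) (hC : 1 ≤ C) (hk : k < R + C - 1) :
    pvT R C k < R * C := by
  have h1 : pvT R C k + 1 ≤ pvT R C (k + 1) := by
    rw [pvT_succ]
    have := pvSize_pos R C k hR hC hk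
    omega
  have hsub : Finset.range (k + 1) ⊆ Finset.range (R + C - 1) := by
    intro x hx
    simp only [Finset.mem_range] at *
    omega
  have h2 : pvT R C (k + 1) ≤ pvT R C (R + C - 1) := Finset.sum_le_sum_of_subset hsub
  rw [pvT_total R C hR hC] at h2
  omega

theorem pvAdjustUp (R C k : Nat) (hC : 1 ≤ C) (hk : k < R + C - 1) :
    (if ((k : Int) - ((pvRmin C k : Nat) : Int) + 1) = (C : Int) then
        (((pvRmin C k : Nat) : Int) - 1 + 2, (k : Int) - ((pvRmin C k : Nat) : Int) + 1 - 1)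
      else (((pvRmin C k : Nat) : Int) - 1 + 1, (k : Int) - ((pvRmin C k : Nat) : Int) + 1))
      = (((pvRmin C (k+1) : Nat) : Int), (((k+1 : Nat)) : Int) - ((pvRmin C (k+1) : Nat) : Int)) := by
  have e1 : pvRmin C k = k + 1 - C := rfl
  have e1' : pvRmin C (k+1) = k + 2 - C := rfl
  split_ifs with h <;> (rw [Prod.mk.injEq]; constructor <;> omega)

theorem pvAdjustDown (R C k : Nat) (hR : 1 ≤ R) (hk : k < R + C - 1) :
    (if ((pvRmax R k : Nat) : Int) + 1 = (R : Int) then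
        (((pvRmax R k : Nat) : Int) + 1 - 1, (k : Int) - ((pvRmax R k : Nat) : Int) - 1 + 2)
      else (((pvRmax R k : Nat) : Int) + 1, (k : Int) - ((pvRmax R k : Nat) : Int) - 1 + 1))
      = (((pvRmax R (k+1) : Nat) : Int), (((k+1 : Nat)) : Int) - ((pvRmax R (k+1) : Nat) : Int)) := by
  have e2 : pvRmax R k = min k (R - 1) := rfl
  have e2' : pvRmax R (k+1) = min (k+1) (R - 1) := rfl
  split_ifs with h <;> (rw [Prod.mk.injEq]; constructor <;> omega)

theorem pvAsc_rev_ne_nil (M : List (List Int)) (R C k : Nat) (hR : 1 ≤ R) (hC : 1 ≤ C)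
    (hk : k < R + C - 1) : (pvAsc M R C k).reverse ≠ [] := by
  have h1 := pvSize_pos R C k hR hC hk
  simp only [pvAsc, ne_eq, List.reverse_eq_nil_iff, List.map_eq_nil_iff, List.range'_eq_nil_iff]
  omega

theorem pvAsc_ne_nil (M : List (List Int)) (R C k : Nat) (hR : 1 ≤ R) (hC : 1 ≤ C)
    (hk : k < R + C - 1) : pvAsc M R C k ≠ [] := by
  have h1 := pvSize_pos R C k hR hC hk
  simp only [pvAsc, ne_eq, List.map_eq_nil_iff, List.range'_eq_nil_iff]
  omega

theorem pvZig_inv (M : List (List Int)) (R C : Nat) (hR : 1 ≤ R) (hC : 1 ≤ C) :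
    ∀ (d k : Nat), k + d = R + C - 1 →
    ∀ (fuel : Nat), d + 1 ≤ fuel → ∀ (res : List (List Int)),
      pvZigLoop M (R : Int) (C : Int) fuel (k % 2 == 0)
        (if k % 2 = 0 then ((pvRmax R k : Nat) : Int) else ((pvRmin C k : Nat) : Int))
        ((k : Int) - (if k % 2 = 0 then ((pvRmax R k : Nat) : Int) else ((pvRmin C k : Nat) : Int)))
        ((pvT R C k : Nat) : Int) res
      = res ++ (List.range' k d).map (fun k' => pvPhase M R C k') := by
  intro d
  induction d with
  | zero =>
    intro k hkd fuel hf res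
    obtain ⟨f, rfl⟩ : ∃ f, fuel = f + 1 := ⟨fuel - 1, by omega⟩
    have hk : k = R + C - 1 := by omega
    have hct : ((pvT R C k : Nat) : Int) = (R : Int) * (C : Int) := by
      subst hk; rw [pvT_total R C hR hC]; push_cast; ring
    rw [pvZigLoop, if_pos hct]
    simp
  | succ d ih =>
    intro k hkd fuel hf res
    obtain ⟨f, rfl⟩ : ∃ f, fuel = f + 1 := ⟨fuel - 1, by omega⟩
    have hk : k < R + C - 1 := by omega
    have hcast : ((R : Int)) * ((C : Int)) = ((R * C : Nat) : Int) := by push_cast; ring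
    have hg : ¬ (((pvT R C k : Nat) : Int) = (R : Int) * (C : Int)) := by
      have := pvT_lt R C k hR hC hk
      rw [hcast]
      omega
    rw [pvZigLoop, if_neg hg]
    have hfu : (((R : Int)) + ((C : Int))).toNat = R + C := by omega
    have hct : ((pvT R C k : Nat) : Int) + ((pvSize R C k : Nat) : Int) = ((pvT R C (k+1) : Nat) : Int) := by
      rw [pvT_succ]; push_cast; ring
    rcases Nat.mod_two_eq_zero_or_one k with hpar | hpar
    · -- even phase: subindo
      have hb : (k % 2 == 0) = true := by simp [hpar]
      have hpar1 : ¬ ((k + 1) % 2 = 0) := by omega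
      have hb1 : ((k + 1) % 2 == 0) = false := by simp [hpar1]
      rw [hb, if_pos rfl, if_pos hpar]
      rw [hfu, pvUpPhase M R C k hR hC hk]
      dsimp only
      rw [pvAdjustUp R C k hC hk]
      dsimp only
      rw [if_pos (pvAsc_rev_ne_nil M R C k hR hC hk), hct]
      have H := ih (k + 1) (by omega) f (by omega) (res ++ [(pvAsc M R C k).reverse])
      rw [hb1, if_neg hpar1] at H
      rw [H, List.range'_succ]
      simp [pvPhase, hpar, List.append_assoc]
    · -- odd phase: descendo
      have hb : (k % 2 == 0) = false := by simp [hpar]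
      have hpar1 : (k + 1) % 2 = 0 := by omega
      have hb1 : ((k + 1) % 2 == 0) = true := by simp [hpar1]
      rw [hb, if_neg (by simp), if_neg (by omega)]
      rw [hfu, pvDownPhase M R C k hR hC hk]
      dsimp only
      rw [pvAdjustDown R C k hR hk]
      dsimp only
      rw [if_pos (pvAsc_ne_nil M R C k hR hC hk), hct]
      have H := ih (k + 1) (by omega) f (by omega) (res ++ [pvAsc M R C k])
      rw [hb1, if_pos hpar1] at H
      rw [H, List.range'_succ]
      simp [pvPhase, hpar, List.append_assoc]

theorem pvHeadLen (M : List (List Int)) (hM : M ≠ []) :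
    (PySem.List.pyGet? M 0).getD [] = M.headD [] := by
  cases M with
  | nil => exact absurd rfl hM
  | cons a t => simp [PySem.List.pyGet?_zero]

theorem pvDP_eq (M : List (List Int)) (R C : Nat) (hlen : M.length = R)
    (hrow : ∀ row ∈ M, row.length = C) (hR : 1 ≤ R) (hC : 1 ≤ C) :
    pvDiagonalPrincipal M = (List.range (R + C - 1)).map (fun k => pvPhase M R C k) := by
  have hM : M ≠ [] := by
    intro h; rw [h] at hlen; simp at hlen; omega
  have hhead : ((PySem.List.pyGet? M 0).getD []).length = C := by
    rw [pvHeadLen M hM]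
    cases M with
    | nil => exact absurd rfl hM
    | cons a t => simpa using hrow a (by simp)
  simp only [pvDiagonalPrincipal]
  rw [hlen, hhead]
  have hfu : (((R : Int)) * ((C : Int))).toNat = R * C := by
    rw [← Nat.cast_mul, Int.toNat_natCast]
  have hRC : R + C - 1 + 1 ≤ R * C + 1 := by
    have h1 : R - 1 ≤ C * (R - 1) := Nat.le_mul_of_pos_left _ hC
    have h3 : C * (R - 1) + C = C * R := by rw [← Nat.mul_succ]; congr 1; omega
    have h4 : C * R = R * C := Nat.mul_comm C R
    omega
  rw [hfu]
  have h := pvZig_inv M R C hR hC (R + C - 1) 0 (by omega) (R * C + 1) (by omega) []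
  have hmax : pvRmax R 0 = 0 := by
    have : pvRmax R 0 = min 0 (R - 1) := rfl
    omega
  rw [hmax] at h
  norm_num [pvT] at h
  rw [h, List.range_eq_range']

theorem pvFilterRangeIcc (n lo hi : Nat) :
    (List.range n).filter (fun r => decide (lo ≤ r ∧ r ≤ hi)) = List.range' lo (min (hi + 1) n - lo) := by
  induction n with
  | zero => simp
  | succ n ih =>
    rw [List.range_succ, List.filter_append, ih]
    by_cases h : lo ≤ n ∧ n ≤ hi
    · have h1 : (List.filter (fun r => decide (lo ≤ r ∧ r ≤ hi)) [n]) = [n] := by simp [h]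
      rw [h1]
      have h2 : min (hi + 1) (n + 1) - lo = (min (hi + 1) n - lo) + 1 := by omega
      have h3 := List.range'_concat (step := 1) (s := lo) (n := min (hi + 1) n - lo)
      have h4 : lo + 1 * (min (hi + 1) n - lo) = n := by omega
      rw [h2, h3, h4]
    · have h1 : (List.filter (fun r => decide (lo ≤ r ∧ r ≤ hi)) [n]) = [] := by
        simp only [List.filter_cons, List.filter_nil]
        rw [if_neg (by simpa using h)]
      have h2 : min (hi + 1) (n + 1) - lo = min (hi + 1) n - lo := by omega
      rw [h1, h2, List.append_nil]

theorem pvMapCells (M : List (List Int)) (k : Nat) (l : List Nat) (hl : ∀ r ∈ l, r ≤ k) :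
    (l.map (fun j : Nat => (j : Int))).map (fun r => pvGetI M r ((k : Int) - r)) =
      l.map (fun r => pvCell M r (k - r)) := by
  rw [List.map_map]
  apply List.map_congr_left
  intro r hr
  have hc : (k : Int) - (r : Int) = ((k - r : Nat) : Int) := by
    have := hl r hr; omega
  simp only [Function.comp_apply]
  rw [hc, pvGetI_cast]

theorem pvModCast (k : Nat) : PySem.Int.mod (k : Int) 2 = ((k % 2 : Nat) : Int) := by
  have h : ((k : Int)).fmod 2 = (k : Int) % 2 := by
    rw [Int.fmod_eq_emod]
    norm_num
  simp only [PySem.Int.mod, h]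
  omega

theorem pvDiag_eq (M : List (List Int)) (R C k : Nat) (hR : 1 ≤ R) (hC : 1 ≤ C)
    (hk : k < R + C - 1) :
    pvDiag M (R : Int) (C : Int) (k : Int) = pvPhase M R C k := by
  have e1 : pvRmin C k = k + 1 - C := rfl
  have e2 : pvRmax R k = min k (R - 1) := rfl
  have e3 : pvSize R C k = pvRmax R k + 1 - pvRmin C k := rfl
  simp only [pvDiag]
  rw [PySem.List.pyRange_zero_natCast, List.filter_map]
  have hpred : ((fun r : Int => decide ((0:Int) ≤ (k:Int) - r ∧ (k:Int) - r < (C:Int))) ∘ (fun j : Nat => (j : Int)))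
      = (fun r : Nat => decide (pvRmin C k ≤ r ∧ r ≤ k)) := by
    funext r
    simp only [Function.comp_apply]
    rw [decide_eq_decide]
    constructor <;> intro <;> omega
  rw [hpred, pvFilterRangeIcc]
  have hsz : min (k + 1) R - pvRmin C k = pvSize R C k := by omega
  rw [hsz, pvModCast]
  have hmem : ∀ r ∈ List.range' (pvRmin C k) (pvSize R C k), r ≤ k := by
    intro r hr
    have := List.mem_range'_1.mp hr
    omega
  by_cases hp : k % 2 = 0
  · rw [if_pos (by rw [hp]; rfl), pvPhase, if_pos hp]
    rw [← List.map_reverse, pvMapCells M k _ (fun r hr => hmem r (List.mem_reverse.mp hr))]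
    rw [pvAsc, ← List.map_reverse]
  · rw [if_neg (by intro hcon; apply hp; omega), pvPhase, if_neg hp]
    rw [pvMapCells M k _ hmem, pvAsc]

theorem pvDiags_eq (M : List (List Int)) (R C : Nat) (hR : 1 ≤ R) (hC : 1 ≤ C) :
    pvDiags M (R : Int) (C : Int) = (List.range (R + C - 1)).map (fun k => pvPhase M R C k) := by
  simp only [pvDiags]
  have hcast : (R : Int) + (C : Int) - 1 = ((R + C - 1 : Nat) : Int) := by omega
  rw [hcast, PySem.List.pyRange_zero_natCast, List.map_map]
  apply List.map_congr_left
  intro k hk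
  simp only [Function.comp_apply]
  exact pvDiag_eq M R C k hR hC (List.mem_range.mp hk)

def pvRotC (M : List (List Int)) (R C : Nat) : List (List Int) :=
  (List.range C).map (fun i => (List.range R).map (fun j => pvCell M (R - 1 - j) i))

theorem pvCell_eq (M : List (List Int)) (r c : Nat) (hr : r < M.length) :
    pvCell M r c = (M[r]).getD c 0 := by
  simp [pvCell, List.getD_eq_getElem?_getD, List.getElem?_eq_getElem hr]

theorem pvZipStarGo_eq : ∀ (C : Nat) (L : List (List Int)), L ≠ [] →
    (∀ row ∈ L, row.length = C) →
    pvZipStarGo C L = (List.range C).map (fun i => L.map (fun row => row.getD i 0)) := by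
  intro C
  induction C with
  | zero => intro L hL hrow; simp [pvZipStarGo]
  | succ C ih =>
    intro L hL hrow
    rw [pvZipStarGo]
    have h1 : L.isEmpty = false := by
      cases L with
      | nil => exact absurd rfl hL
      | cons a t => rfl
    have h2 : (L.any fun r => r.isEmpty) = false := by
      rw [List.any_eq_false]
      intro r hr
      have hlen := hrow r hr
      cases r with
      | nil => simp at hlen
      | cons x xs => simp
    rw [h1, h2]
    simp only [Bool.false_eq_true, if_false]
    have htail : ∀ row ∈ L.map List.tail, row.length = C := by
      intro row hmem
      obtain ⟨r, hr, rfl⟩ := List.mem_map.mp hmem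
      have := hrow r hr
      rw [List.length_tail]
      omega
    rw [ih (L.map List.tail) (by simpa using hL) htail]
    rw [List.range_succ_eq_map]
    simp only [List.map_cons, List.map_map]
    congr 1
    · apply List.map_congr_left
      intro r hr
      cases r with
      | nil => have := hrow _ hr; simp at this
      | cons x xs => rfl
    · apply List.map_congr_left
      intro i _
      simp only [Function.comp_apply, List.map_map]
      apply List.map_congr_left
      intro r _
      cases r with
      | nil => rfl
      | cons x xs => simp [Function.comp_apply, List.getD_cons_succ]

theorem pvRodar_eq (M : List (List Int)) (R C : Nat) (hlen : M.length = R)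
    (hrow : ∀ row ∈ M, row.length = C) (hR : 1 ≤ R) (hC : 1 ≤ C) :
    pvRodarMatriz M = pvRotC M R C := by
  subst hlen
  have hM : M ≠ [] := by
    intro h; rw [h] at hR; simp at hR
  have hMrev : M.reverse ≠ [] := by simpa using hM
  simp only [pvRodarMatriz, PySem.List.slice?_none_none_neg_one, Option.getD_some, pvZipStar]
  have hhead : (M.reverse.headD []).length = C := by
    cases hrev : M.reverse with
    | nil => exact absurd hrev hMrev
    | cons a t =>
      have ha : a ∈ M.reverse := by rw [hrev]; exact List.mem_cons_self
      rw [List.mem_reverse] at ha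
      simpa [hrev] using hrow a ha
  rw [hhead, pvZipStarGo_eq C M.reverse hMrev (fun row h => hrow row (List.mem_reverse.mp h))]
  unfold pvRotC
  apply List.map_congr_left
  intro i _
  apply List.ext_getElem
  · simp
  · intro j hj1 hj2
    rw [List.getElem_map, List.getElem_map, List.getElem_reverse, List.getElem_range]
    have hjR : j < M.length := by simpa using hj2
    rw [pvCell_eq M (M.length - 1 - j) i (by omega)]

theorem pvRot_eq (M : List (List Int)) (R C : Nat) :
    pvRot M (R : Int) (C : Int) = pvRotC M R C := by
  simp only [pvRot, pvRotC]
  rw [PySem.List.pyRange_zero_natCast, PySem.List.pyRange_zero_natCast, List.map_map]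
  apply List.map_congr_left
  intro i _
  simp only [Function.comp_apply]
  rw [List.map_map]
  apply List.map_congr_left
  intro j hj
  have hjR := List.mem_range.mp hj
  simp only [Function.comp_apply]
  have hc : (R : Int) - 1 - (j : Int) = ((R - 1 - j : Nat) : Int) := by omega
  rw [hc, pvGetI_cast]

theorem pvRotC_length (M : List (List Int)) (R C : Nat) : (pvRotC M R C).length = C := by
  simp [pvRotC]

theorem pvRotC_rows (M : List (List Int)) (R C : Nat) :
    ∀ row ∈ pvRotC M R C, row.length = R := by
  intro row h
  obtain ⟨i, hi, rfl⟩ := List.mem_map.mp h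
  simp

theorem pvFoldlApp (L : List (List Int)) : ∀ acc : List (List Int),
    L.foldl (fun a x => a ++ [x]) acc = acc ++ L := by
  induction L with
  | nil => intro acc; simp
  | cons a t ih => intro acc; simp [List.foldl_cons, ih]

-- ===== VERDICT (by name: the statement is the Claim_ definition above) =====
theorem obter_linhas_spec : Claim_equal_obter_linhas := by
  intro matriz _ hpre
  obtain ⟨hM, hhead, hrow⟩ := hpre
  show obter_linhas matriz = obter_linhas_alt matriz
  have hR : 1 ≤ matriz.length := List.length_pos_of_ne_nil hM
  have hC : 1 ≤ (matriz.headD []).length := List.length_pos_of_ne_nil hhead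
  have hheadD : (PySem.List.pyGet? matriz 0).getD [] = matriz.headD [] := pvHeadLen matriz hM
  simp only [obter_linhas, obter_linhas_alt, pvDiagonalSecundaria]
  rw [hheadD]
  rw [pvRodar_eq matriz matriz.length (matriz.headD []).length rfl hrow hR hC]
  rw [pvRot_eq matriz matriz.length (matriz.headD []).length]
  rw [pvDP_eq matriz matriz.length (matriz.headD []).length rfl hrow hR hC]
  rw [pvDP_eq (pvRotC matriz matriz.length (matriz.headD []).length)
        (matriz.headD []).length matriz.length (pvRotC_length _ _ _) (pvRotC_rows _ _ _) hC hR]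
  rw [pvDiags_eq matriz matriz.length (matriz.headD []).length hR hC]
  rw [pvDiags_eq (pvRotC matriz matriz.length (matriz.headD []).length)
        (matriz.headD []).length matriz.length hC hR]
  rw [pvFoldlApp, pvFoldlApp]
  simp [List.append_assoc]
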